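-- pv_equiv track=rewrite | github.com/slynnykusbk-glitch/contract_ai | contract_review_app/engine/intake.py | _dedupe_sorted
-- ===== SOURCE A (Python) =====
-- from typing import Any, Dict, List, Optional
--
-- def _dedupe_sorted(points: List[int], n: int) -> List[int]:
--     pts = sorted(p for p in points if 0 <= p < n)
--     out: List[int] = []
--     last = None
--     for p in pts:
--         if last is None or p != last:
--             out.append(p)
--             last = p
--     return out
-- ===== SOURCE B (Python) =====
-- from typing import List
--
-- def _dedupe_sorted(points: List[int], n: int) -> List[int]:
--     return sorted({p for p in points if 0 <= p < n})
-- ===== Notes on version B (the rewrite author's own statement) =====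
-- stated objective: simpler
-- what changed: Replaces A's sort-then-adjacent-dedupe loop (with its `last` sentinel) by hash-set deduplication of the in-range points followed by a single sort, written as one expression.
import Mathlib
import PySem

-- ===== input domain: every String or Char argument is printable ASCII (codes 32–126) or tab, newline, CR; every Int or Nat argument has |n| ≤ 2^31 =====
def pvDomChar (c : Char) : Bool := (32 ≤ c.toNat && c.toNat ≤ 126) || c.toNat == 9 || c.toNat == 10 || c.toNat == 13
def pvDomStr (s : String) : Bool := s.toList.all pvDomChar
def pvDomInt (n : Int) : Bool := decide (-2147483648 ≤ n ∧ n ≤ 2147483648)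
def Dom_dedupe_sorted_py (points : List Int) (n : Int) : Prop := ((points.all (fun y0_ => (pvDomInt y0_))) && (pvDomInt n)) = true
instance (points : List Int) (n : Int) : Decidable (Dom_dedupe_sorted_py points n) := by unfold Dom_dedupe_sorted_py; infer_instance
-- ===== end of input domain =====

-- B replaces A's sort-then-adjacent-dedupe loop (with its `last` sentinel) by set
-- deduplication of the in-range points followed by one sort; objective: simpler.

-- ===== PORT A =====
-- the 'for p in pts' loop of A, carrying its two variables out and last
def pvDedupeLoop : List Int → List Int → Option Int → List Int
  | [], out, _ => out
  | p :: rest, out, last =>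
      if last = none ∨ some p ≠ last then pvDedupeLoop rest (out ++ [p]) (some p)
      else pvDedupeLoop rest out last

def dedupe_sorted_py (points : List Int) (n : Int) : List Int :=
  let pts := PySem.List.sorted (points.filter (fun p => decide (0 ≤ p) && decide (p < n))) (fun x => x) false
  pvDedupeLoop pts [] none

-- ===== PORT B =====
def dedupe_sorted_py_alt (points : List Int) (n : Int) : List Int :=
  PySem.List.sorted (PySem.Set.ofList (points.filter (fun p => decide (0 ≤ p) && decide (p < n)))) (fun x => x) false

-- ===== PRECONDITION & SPEC =====
def Spec_dedupe_sorted_py (points : List Int) (n : Int) (out : List Int) : Prop := out = dedupe_sorted_py_alt points n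
instance (points : List Int) (n : Int) (out : List Int) : Decidable (Spec_dedupe_sorted_py points n out) := by unfold Spec_dedupe_sorted_py; infer_instance

-- ===== CLAIM (what is proved, stated in full; the proofs are below) =====
def Claim_equal_dedupe_sorted_py : Prop := ∀ (points : List Int) (n : Int), Dom_dedupe_sorted_py points n → Spec_dedupe_sorted_py points n (dedupe_sorted_py points n)

-- ===== LEMMAS AND PROOFS =====

-- invariant of A's loop: on a ≤-sorted remainder, with `last` the maximum of `out`
-- and a lower bound of the remainder, the result is <-sorted and holds exactly the
-- elements of `out` and of the remainder
theorem pvDedupeLoop_spec (pts : List Int) : ∀ (out : List Int) (l : Option Int),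
    pts.Pairwise (· ≤ ·) → out.Pairwise (· < ·) →
    (match l with
     | none => out = []
     | some v => v ∈ out ∧ (∀ x ∈ out, x ≤ v) ∧ (∀ p ∈ pts, v ≤ p)) →
    (pvDedupeLoop pts out l).Pairwise (· < ·) ∧
      (∀ x, x ∈ pvDedupeLoop pts out l ↔ x ∈ out ∨ x ∈ pts) := by
  induction pts with
  | nil =>
    intro out l _ hout _
    simp [pvDedupeLoop, hout]
  | cons p rest ih =>
    intro out l hpts hout hl
    rw [List.pairwise_cons] at hpts
    match l with
    | none =>
      subst hl
      obtain ⟨h1, h2⟩ := ih [p] (some p) hpts.2 (by simp)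
        ⟨by simp, by simp, fun q hq => hpts.1 q hq⟩
      constructor
      · simpa [pvDedupeLoop] using h1
      · intro x
        simp only [pvDedupeLoop, List.nil_append]
        rw [if_pos (Or.inl trivial), h2 x]; simp
    | some v =>
      obtain ⟨hv_mem, hv_max, hv_lb⟩ := hl
      by_cases hpv : p = v
      · subst hpv
        simp only [pvDedupeLoop]
        rw [if_neg (by simp)]
        obtain ⟨h1, h2⟩ := ih out (some p) hpts.2
          hout ⟨hv_mem, hv_max, fun q hq => le_trans (hv_lb p (by simp)) (hpts.1 q hq)⟩
        refine ⟨h1, fun x => ?_⟩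
        rw [h2 x]
        simp only [List.mem_cons]
        constructor
        · rintro (h | h)
          · exact Or.inl h
          · exact Or.inr (Or.inr h)
        · rintro (h | h | h)
          · exact Or.inl h
          · exact h ▸ Or.inl hv_mem
          · exact Or.inr h
      · simp only [pvDedupeLoop]
        rw [if_pos (Or.inr (by simp [hpv]))]
        have hvp : v < p := lt_of_le_of_ne (hv_lb p (by simp)) (Ne.symm hpv)
        obtain ⟨h1, h2⟩ := ih (out ++ [p]) (some p) hpts.2
          (by
            rw [List.pairwise_append]
            exact ⟨hout, by simp, by
              intro x hx y hy
              simp at hy; subst hy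
              exact lt_of_le_of_lt (hv_max x hx) hvp⟩)
          ⟨by simp, by
            intro x hx
            simp at hx
            rcases hx with hx | hx
            · exact le_of_lt (lt_of_le_of_lt (hv_max x hx) hvp)
            · simp [hx], fun q hq => hpts.1 q hq⟩
        refine ⟨h1, fun x => ?_⟩
        rw [h2 x]
        simp [or_assoc]

-- ===== VERDICT (by name: the statement is the Claim_ definition above) =====
theorem dedupe_sorted_py_spec : Claim_equal_dedupe_sorted_py := by
  intro points n _
  unfold Spec_dedupe_sorted_py dedupe_sorted_py dedupe_sorted_py_alt
  set xs := points.filter (fun p => decide (0 ≤ p) && decide (p < n)) with hxs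
  have hpw : (PySem.List.sorted xs (fun x => x) false).Pairwise (· ≤ ·) :=
    PySem.List.sorted_pairwise xs (fun x => x)
  obtain ⟨h1, h2⟩ := pvDedupeLoop_spec (PySem.List.sorted xs (fun x => x) false) [] none hpw
    (by simp) rfl
  have hperm : (pvDedupeLoop (PySem.List.sorted xs (fun x => x) false) [] none).Perm
      (PySem.Set.ofList xs) := by
    rw [List.perm_ext_iff_of_nodup (h1.imp ne_of_lt) (PySem.Set.nodup_ofList xs)]
    intro a
    rw [h2 a, PySem.Set.mem_ofList]
    simp [PySem.List.mem_sorted]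
  exact (PySem.List.sorted_eq_of_perm_of_pairwise_lt _ _ (key := fun x => x) hperm h1).symm
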